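-- pv_equiv track=rewrite | github.com/kamasamikon/libhilda | tools/cfile_checker.py | check_mix_line
-- ===== SOURCE A (Python) =====
-- def check_mix_line(line, tabstop):
--     space_count = 0
--     tab_count = 0
--
--     for c in line:
--         if c == '\t':
--             if space_count:
--                 return True
--             tab_count += 1
--         elif c == ' ':
--             space_count += 1
--         else:
--             break
--
--     if tab_count:
--         if space_count >= tabstop:
--             return True
--
--     return False
-- ===== SOURCE B (Python) =====
-- def check_mix_line(line, tabstop):
--     prefix = ""
--     for c in line:
--         if c != ' ' and c != '\t':
--             break
--         prefix += c
--     if ' ' in prefix and '\t' in prefix[prefix.index(' '):]: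
--         return True
--     return '\t' in prefix and prefix.count(' ') >= tabstop
-- ===== Notes on version B (the rewrite author's own statement) =====
-- stated objective: simpler
-- what changed: Replaces A's interleaved early-exit counting scan with a build-then-analyze decomposition: first take the leading ' '/' ' prefix, then decide by a single containment test (' ' after the first space) and a count comparison.
import Mathlib
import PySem

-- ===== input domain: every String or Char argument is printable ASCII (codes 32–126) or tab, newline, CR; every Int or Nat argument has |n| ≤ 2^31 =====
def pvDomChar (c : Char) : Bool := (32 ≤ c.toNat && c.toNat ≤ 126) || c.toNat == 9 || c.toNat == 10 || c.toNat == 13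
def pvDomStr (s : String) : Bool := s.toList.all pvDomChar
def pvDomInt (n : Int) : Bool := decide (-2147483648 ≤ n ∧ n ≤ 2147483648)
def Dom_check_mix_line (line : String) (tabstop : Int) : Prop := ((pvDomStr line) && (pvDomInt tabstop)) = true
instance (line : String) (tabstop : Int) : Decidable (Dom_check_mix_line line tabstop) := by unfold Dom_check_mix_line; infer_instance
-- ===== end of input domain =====

-- B replaces A's interleaved early-exit counting scan with a build-then-analyze decomposition
-- (take the leading ' '/'\t' prefix, then one containment test and one count); objective: simpler.

-- B replaces A's interleaved early-exit counting scan with a build-then-analyze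
-- decomposition (take the whitespace prefix, then test/count it); objective: simpler.


-- ===== PORT A =====
-- the 'if tab_count: if space_count >= tabstop: return True / return False' tail of A
def cmlFinal (sc tc : Nat) (ts : Int) : Bool := decide (tc ≠ 0) && decide (ts ≤ (sc : Int))

def cmlLoop : List Char → Nat → Nat → Int → Bool
  | [], sc, tc, ts => cmlFinal sc tc ts
  | c :: rest, sc, tc, ts =>
    if c = '\t' then
      if sc ≠ 0 then true else cmlLoop rest sc (tc + 1) ts
    else if c = ' ' then cmlLoop rest (sc + 1) tc ts
    else cmlFinal sc tc ts

def check_mix_line (line : String) (tabstop : Int) : Bool :=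
  cmlLoop line.toList 0 0 tabstop

-- ===== PORT B =====
def check_mix_line_alt (line : String) (tabstop : Int) : Bool :=
  let pre := line.toList.takeWhile (fun c => c == ' ' || c == '\t')
  if ' ' ∈ pre ∧ '\t' ∈ pre.drop (pre.idxOf ' ') then true
  else decide ('\t' ∈ pre) && decide (tabstop ≤ (pre.count ' ' : Int))

-- ===== PRECONDITION & SPEC =====
def Spec_check_mix_line (line : String) (tabstop : Int) (out : Bool) : Prop := out = check_mix_line_alt line tabstop
instance (line : String) (tabstop : Int) (out : Bool) : Decidable (Spec_check_mix_line line tabstop out) := by unfold Spec_check_mix_line; infer_instance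

-- ===== CLAIM (what is proved, stated in full; the proofs are below) =====
def Claim_equal_check_mix_line : Prop := ∀ (line : String) (tabstop : Int), Dom_check_mix_line line tabstop → Spec_check_mix_line line tabstop (check_mix_line line tabstop)

-- ===== LEMMAS AND PROOFS =====

-- loop invariant: A's scan, carrying counts (sc, tc) of spaces/tabs already seen,
-- equals B's prefix analysis of the remaining characters, contextualised by those counts
lemma cmlLoop_eq (ts : Int) : ∀ (cs : List Char) (sc tc : Nat),
    cmlLoop cs sc tc ts =
      (let p := cs.takeWhile (fun c => c == ' ' || c == '\t')
       if (sc ≠ 0 ∧ '\t' ∈ p) ∨ (' ' ∈ p ∧ '\t' ∈ p.drop (p.idxOf ' '))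
       then true
       else decide (tc ≠ 0 ∨ '\t' ∈ p) && decide (ts ≤ (sc : Int) + p.count ' ')) := by
  intro cs
  induction cs with
  | nil => intro sc tc; simp [cmlLoop, cmlFinal]
  | cons c rest ih =>
      intro sc tc
      by_cases hct : c = '\t'
      · subst hct
        have hpre : List.takeWhile (fun c => c == ' ' || c == '\t') ('\t' :: rest)
            = '\t' :: List.takeWhile (fun c => c == ' ' || c == '\t') rest := by
          simp
        by_cases hsc : sc = 0
        · subst hsc
          simp only [cmlLoop]
          rw [if_pos trivial, if_neg (by omega : ¬(0:Nat) ≠ 0), ih, hpre]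
          simp only [List.idxOf_cons, List.count_cons]
          by_cases hM : ' ' ∈ List.takeWhile (fun c => c == ' ' || c == '\t') rest
          · simp [hM, List.drop_succ_cons]
          · simp [hM, List.drop_succ_cons]
        · simp [cmlLoop, hsc, hpre]
      · by_cases hcs : c = ' '
        · subst hcs
          have hpre : List.takeWhile (fun c => c == ' ' || c == '\t') (' ' :: rest)
              = ' ' :: List.takeWhile (fun c => c == ' ' || c == '\t') rest := by
            simp
          simp only [cmlLoop, if_neg (by decide : ¬(' ' = '\t')), hpre]
          rw [ih]
          by_cases hTb : '\t' ∈ List.takeWhile (fun c => c == ' ' || c == '\t') rest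
          · simp [hTb]
          · have hTD : '\t' ∉ (List.takeWhile (fun c => c == ' ' || c == '\t') rest).drop
                ((List.takeWhile (fun c => c == ' ' || c == '\t') rest).idxOf ' ') :=
              fun h => hTb (List.mem_of_mem_drop h)
            simp only [hTb, hTD, List.mem_cons, List.count_cons, List.idxOf_cons]
            simp [hTb]
            have h : (sc : Int) + 1 + (List.count ' ' (List.takeWhile (fun c => c == ' ' || c == '\t') rest) : Int)
                = (sc : Int) + ((List.count ' ' (List.takeWhile (fun c => c == ' ' || c == '\t') rest) : Int) + 1) := by ring
            rw [h]
        · have hpre : List.takeWhile (fun c => c == ' ' || c == '\t') (c :: rest) = [] := by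
            simp [hct, hcs]
          simp [cmlLoop, hct, hcs, cmlFinal, hpre]

-- ===== VERDICT (by name: the statement is the Claim_ definition above) =====
theorem check_mix_line_spec : Claim_equal_check_mix_line := by
  intro line ts _
  unfold Spec_check_mix_line check_mix_line check_mix_line_alt
  rw [cmlLoop_eq]
  simp
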